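-- pv_equiv track=rewrite | github.com/JaeLinJoo/Python-Team-Notes | Study/hw/1548.py | sub_tri_seq
-- ===== SOURCE A (Python) =====
-- from itertools import combinations
--
-- def sub_tri_seq(a):
--   sub_seq = set(a)
--   comb = list(combinations(a,3))
--   for c in comb:
--     c= list(c)
--     c.sort()
--     if c[0]+c[1]<=c[2]:
--       sub_seq.discard(c[0])
--   return sub_seq
-- ===== SOURCE B (Python) =====
-- def sub_tri_seq(a):
--     s = sorted(a)
--     n = len(s)
--     removed = set()
--     for i in range(n - 2):
--         if s[i] + s[i + 1] <= s[n - 1]: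
--             removed.add(s[i])
--     return set(a) - removed
-- ===== Notes on version B (the rewrite author's own statement) =====
-- stated objective: faster
-- what changed: Instead of materializing all O(n^3) 3-combinations and discarding the minimum of each degenerate sorted triple, B sorts the list once and removes s[i] exactly when s[i] + s[i+1] <= s[n-1], since the next-larger element and the global maximum form the easiest degenerate triple with minimum s[i].
import Mathlib
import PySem

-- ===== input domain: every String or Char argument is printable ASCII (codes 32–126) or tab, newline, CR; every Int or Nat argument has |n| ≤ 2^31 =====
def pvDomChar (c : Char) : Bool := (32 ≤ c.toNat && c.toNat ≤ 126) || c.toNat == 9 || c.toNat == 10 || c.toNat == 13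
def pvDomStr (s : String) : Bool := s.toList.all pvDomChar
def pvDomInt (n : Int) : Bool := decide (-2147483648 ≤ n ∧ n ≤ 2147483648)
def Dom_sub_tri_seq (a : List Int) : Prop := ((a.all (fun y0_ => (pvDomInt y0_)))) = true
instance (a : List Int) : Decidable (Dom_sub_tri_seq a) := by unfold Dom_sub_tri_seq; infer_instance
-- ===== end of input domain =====

-- B replaces A's scan of all triples by one sort: a value is the minimum of a degenerate
-- triple iff at some sorted position i, s[i] + s[i+1] <= s[n-1]; objective: faster.

-- ===== PORT A =====
-- list(itertools.combinations(a, k)) for k = 2 and 3, tuples as lists, lexicographic by position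
def pyCombs2 (l : List Int) : List (List Int) :=
  match l with
  | [] => []
  | x :: xs => xs.map (fun y => [x, y]) ++ pyCombs2 xs

def pyCombs3 (l : List Int) : List (List Int) :=
  match l with
  | [] => []
  | x :: xs => (pyCombs2 xs).map (fun p => x :: p) ++ pyCombs3 xs

def sub_tri_seq (a : List Int) : List Int :=
  let sub_seq := PySem.Set.ofList a
  let comb := pyCombs3 a
  comb.foldl (fun s c =>
      -- c = list(c); c.sort(); if c[0]+c[1] <= c[2]: sub_seq.discard(c[0])
      -- (every element of comb has length 3, so the wildcard arm is unreachable)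
      match PySem.List.sorted c (fun x => x) false with
      | [x, y, z] => if x + y ≤ z then PySem.Set.discard s x else s
      | _ => s)
    sub_seq

-- ===== PORT B =====
def sub_tri_seq_alt (a : List Int) : List Int :=
  let s := PySem.List.sorted a (fun x => x) false
  let n : Int := s.length
  let removed := (PySem.List.pyRange 0 (n - 2) 1).foldl
    (fun r i =>
      if PySem.List.pyGetD s i 0 + PySem.List.pyGetD s (i + 1) 0 ≤ PySem.List.pyGetD s (n - 1) 0
      then PySem.Set.add r (PySem.List.pyGetD s i 0) else r)
    PySem.Set.empty
  PySem.Set.diff (PySem.Set.ofList a) removed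

-- ===== PRECONDITION & SPEC =====
def Spec_sub_tri_seq (a : List Int) (out : List Int) : Prop := out = sub_tri_seq_alt a
instance (a : List Int) (out : List Int) : Decidable (Spec_sub_tri_seq a out) := by unfold Spec_sub_tri_seq; infer_instance

-- ===== CLAIM (what is proved, stated in full; the proofs are below) =====
def Claim_equal_sub_tri_seq : Prop := ∀ (a : List Int), Dom_sub_tri_seq a → Spec_sub_tri_seq a (sub_tri_seq a)

-- ===== LEMMAS AND PROOFS =====

-- the value A discards for one triple c: min(c) when the sorted triple is degenerate, else nothing
def pvBadMin (c : List Int) : Option Int :=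
  match PySem.List.sorted c (fun x => x) false with
  | [x, y, z] => if x + y ≤ z then some x else none
  | _ => none

def pvStepA (s : List Int) (c : List Int) : List Int :=
  match pvBadMin c with
  | some x => PySem.Set.discard s x
  | none => s

lemma pvStepA_eq (s c : List Int) :
    (match PySem.List.sorted c (fun x => x) false with
      | [x, y, z] => if x + y ≤ z then PySem.Set.discard s x else s
      | _ => s) = pvStepA s c := by
  unfold pvStepA pvBadMin
  rcases hs : PySem.List.sorted c (fun x => x) false with _ | ⟨x, _ | ⟨y, _ | ⟨z, _ | ⟨w, t⟩⟩⟩⟩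
  · rfl
  · rfl
  · rfl
  · by_cases hxy : x + y ≤ z <;> simp [hxy]
  · rfl

lemma pvFoldA (L : List (List Int)) (init : List Int) :
    L.foldl pvStepA init
      = init.filter (fun v => L.all (fun c => !(pvBadMin c == some v))) := by
  induction L generalizing init with
  | nil => simp
  | cons c L ih =>
    rw [List.foldl_cons, ih]
    unfold pvStepA
    cases hb : pvBadMin c with
    | none => simp [hb]
    | some x =>
      show (PySem.Set.discard init x).filter _ = _
      unfold PySem.Set.discard
      rw [List.filter_filter]
      refine List.filter_congr (fun v _ => ?_)
      have hvx : (v == x) = (x == v) := by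
        by_cases h : v = x
        · subst h; rfl
        · rw [beq_eq_false_iff_ne.mpr h, beq_eq_false_iff_ne.mpr (fun hh => h hh.symm)]
      simp [List.all_cons, hb, hvx, Bool.and_comm]

lemma pvA_eq (a : List Int) :
    sub_tri_seq a = (PySem.Set.ofList a).filter
      (fun v => (pyCombs3 a).all (fun c => !(pvBadMin c == some v))) := by
  have hfun : (fun (s c : List Int) =>
      match PySem.List.sorted c (fun x => x) false with
      | [x, y, z] => if x + y ≤ z then PySem.Set.discard s x else s
      | _ => s) = pvStepA := funext fun s => funext fun c => pvStepA_eq s c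
  show (pyCombs3 a).foldl _ (PySem.Set.ofList a) = _
  rw [hfun, pvFoldA]

-- membership in B's `removed` accumulator
lemma pvMemRemoved (s : List Int) (n : Int) (L : List Int) (r : List Int) (v : Int) :
    v ∈ L.foldl (fun r i =>
        if PySem.List.pyGetD s i 0 + PySem.List.pyGetD s (i + 1) 0 ≤ PySem.List.pyGetD s (n - 1) 0
        then PySem.Set.add r (PySem.List.pyGetD s i 0) else r) r
      ↔ v ∈ r ∨ ∃ i ∈ L,
          PySem.List.pyGetD s i 0 + PySem.List.pyGetD s (i + 1) 0 ≤ PySem.List.pyGetD s (n - 1) 0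
          ∧ PySem.List.pyGetD s i 0 = v := by
  induction L generalizing r with
  | nil => simp
  | cons j L ih =>
    rw [List.foldl_cons]
    by_cases hc : PySem.List.pyGetD s j 0 + PySem.List.pyGetD s (j + 1) 0 ≤ PySem.List.pyGetD s (n - 1) 0
    · rw [if_pos hc, ih]
      simp only [PySem.Set.mem_add, List.mem_cons]
      constructor
      · rintro ((h | h) | ⟨i, hi, h1, h2⟩)
        · exact Or.inl h
        · exact Or.inr ⟨j, Or.inl rfl, hc, h.symm⟩
        · exact Or.inr ⟨i, Or.inr hi, h1, h2⟩
      · rintro (h | ⟨i, (rfl | hi), h1, h2⟩)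
        · exact Or.inl (Or.inl h)
        · exact Or.inl (Or.inr h2.symm)
        · exact Or.inr ⟨i, hi, h1, h2⟩
    · rw [if_neg hc, ih]
      simp only [List.mem_cons]
      constructor
      · rintro (h | ⟨i, hi, h1, h2⟩)
        · exact Or.inl h
        · exact Or.inr ⟨i, Or.inr hi, h1, h2⟩
      · rintro (h | ⟨i, (rfl | hi), h1, h2⟩)
        · exact Or.inl h
        · exact absurd h1 hc
        · exact Or.inr ⟨i, hi, h1, h2⟩

lemma pvMem_pyCombs2 (c : List Int) (l : List Int) :
    c ∈ pyCombs2 l ↔ c.Sublist l ∧ c.length = 2 := by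
  induction l generalizing c with
  | nil =>
    simp only [pyCombs2, List.not_mem_nil, false_iff, not_and, List.sublist_nil]
    rintro rfl; simp
  | cons w l ih =>
    simp only [pyCombs2, List.mem_append, List.mem_map, ih]
    constructor
    · rintro (⟨y, hy, rfl⟩ | ⟨hsub, hlen⟩)
      · exact ⟨List.Sublist.cons₂ _ (List.singleton_sublist.mpr hy), rfl⟩
      · exact ⟨hsub.cons _, hlen⟩
    · rintro ⟨hsub, hlen⟩
      rcases List.sublist_cons_iff.mp hsub with h | ⟨r, rfl, hr⟩
      · exact Or.inr ⟨h, hlen⟩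
      · have hlen' : r.length = 1 := by simp at hlen; omega
        obtain ⟨y, rfl⟩ := List.length_eq_one_iff.mp hlen'
        exact Or.inl ⟨y, List.singleton_sublist.mp hr, rfl⟩

lemma pvMem_pyCombs3 (c : List Int) (l : List Int) :
    c ∈ pyCombs3 l ↔ c.Sublist l ∧ c.length = 3 := by
  induction l generalizing c with
  | nil =>
    simp only [pyCombs3, List.not_mem_nil, false_iff, not_and, List.sublist_nil]
    rintro rfl; simp
  | cons w l ih =>
    simp only [pyCombs3, List.mem_append, List.mem_map, ih, pvMem_pyCombs2]
    constructor
    · rintro (⟨p, ⟨hp, hlen⟩, rfl⟩ | ⟨hsub, hlen⟩)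
      · exact ⟨List.Sublist.cons₂ _ hp, by simp [hlen]⟩
      · exact ⟨hsub.cons _, hlen⟩
    · rintro ⟨hsub, hlen⟩
      rcases List.sublist_cons_iff.mp hsub with h | ⟨r, rfl, hr⟩
      · exact Or.inr ⟨h, hlen⟩
      · have hlen' : r.length = 2 := by simp at hlen; omega
        exact Or.inl ⟨r, ⟨hr, hlen'⟩, rfl⟩

-- a ≤-sorted list that is a sub-multiset of a ≤-sorted list is a sublist of it
lemma pvSubSorted (m : List Int) : ∀ (l : List Int), l.Subperm m →
    l.Pairwise (· ≤ ·) → m.Pairwise (· ≤ ·) → l.Sublist m := by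
  induction m with
  | nil => intro l h _ _; rw [List.subperm_nil] at h; simp [h]
  | cons y m ih =>
    intro l h hl hm
    cases l with
    | nil => exact List.nil_sublist _
    | cons x l =>
      have hx : x ∈ y :: m := h.subset (by simp : x ∈ x :: l)
      have hyx : y ≤ x := by
        rcases List.mem_cons.mp hx with rfl | hx'
        · exact le_refl _
        · exact List.rel_of_pairwise_cons hm hx'
      by_cases hxy : x = y
      · subst hxy
        have h' : l.Subperm m := by
          rw [List.subperm_ext_iff] at h ⊢
          intro t ht
          have h2 := h t (List.mem_cons_of_mem _ ht)
          simp only [List.count_cons] at h2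
          omega
        exact (ih l h' hl.of_cons hm.of_cons).cons₂ _
      · have hyl : y ∉ x :: l := by
          intro hmem
          rcases List.mem_cons.mp hmem with h1 | h1
          · exact hxy h1.symm
          · exact hxy (le_antisymm (List.rel_of_pairwise_cons hl h1) hyx)
        have h' : (x :: l).Subperm m := by
          rw [List.subperm_ext_iff] at h ⊢
          intro t ht
          have h2 := h t ht
          have hty : (y == t) = false := by
            rw [beq_eq_false_iff_ne]; rintro rfl; exact hyl ht
          simp [List.count_cons, hty] at h2 ⊢
          omega
        exact (ih (x :: l) h' hl hm.of_cons).cons _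

lemma pvSortedMono (s : List Int) (hs : s.Pairwise (· ≤ ·)) {i j : Nat}
    (hij : i ≤ j) (hj : j < s.length) : s.getD i 0 ≤ s.getD j 0 := by
  rcases Nat.eq_or_lt_of_le hij with rfl | hlt
  · exact le_refl _
  · rw [List.getD_eq_getElem s 0 (lt_of_le_of_lt hij hj), List.getD_eq_getElem s 0 hj]
    exact List.pairwise_iff_getElem.mp hs i j _ hj hlt

-- a 3-element sublist is given by three increasing indices, and conversely
lemma pvSublist3 (x y z : Int) (s : List Int) (h : [x, y, z].Sublist s) :
    ∃ i j k : Nat, i < j ∧ j < k ∧ k < s.length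
      ∧ s.getD i 0 = x ∧ s.getD j 0 = y ∧ s.getD k 0 = z := by
  obtain ⟨is, his, hpw⟩ := List.sublist_eq_map_getElem h
  rcases is with _ | ⟨i, _ | ⟨j, _ | ⟨k, _ | ⟨w, t⟩⟩⟩⟩ <;>
    simp only [List.map_cons, List.map_nil] at his
  · exact absurd his (by simp)
  · exact absurd his (by simp)
  · exact absurd his (by simp)
  · simp only [List.cons.injEq, and_true] at his
    obtain ⟨hx, hy, hz⟩ := his
    have h1 : (i : Fin s.length) < j := List.rel_of_pairwise_cons hpw (by simp)
    have h2 : (j : Fin s.length) < k := List.rel_of_pairwise_cons hpw.of_cons (by simp)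
    refine ⟨i.val, j.val, k.val, h1, h2, k.isLt, ?_, ?_, ?_⟩
    · rw [List.getD_eq_getElem s 0 i.isLt]; exact hx.symm
    · rw [List.getD_eq_getElem s 0 j.isLt]; exact hy.symm
    · rw [List.getD_eq_getElem s 0 k.isLt]; exact hz.symm
  · exact absurd his (by simp)

lemma pvSublist_of_idx (s : List Int) (i j k : Nat)
    (hij : i < j) (hjk : j < k) (hk : k < s.length) :
    [s.getD i 0, s.getD j 0, s.getD k 0].Sublist s := by
  have hi : i < s.length := lt_trans (lt_trans hij hjk) hk
  have hj : j < s.length := lt_trans hjk hk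
  have hpw : List.Pairwise (· < ·) ([⟨i, hi⟩, ⟨j, hj⟩, ⟨k, hk⟩] : List (Fin s.length)) := by
    refine List.Pairwise.cons ?_ (List.Pairwise.cons ?_ (List.Pairwise.cons ?_ List.Pairwise.nil))
    · intro b hb
      rcases List.mem_cons.mp hb with rfl | hb
      · exact Fin.mk_lt_mk.mpr hij
      · rcases List.mem_cons.mp hb with rfl | hb
        · exact Fin.mk_lt_mk.mpr (lt_trans hij hjk)
        · simp at hb
    · intro b hb
      rcases List.mem_cons.mp hb with rfl | hb
      · exact Fin.mk_lt_mk.mpr hjk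
      · simp at hb
    · intro b hb; simp at hb
  have hsub := List.map_getElem_sublist (l := s) hpw
  rw [List.getD_eq_getElem s 0 hi, List.getD_eq_getElem s 0 hj, List.getD_eq_getElem s 0 hk]
  exact hsub

-- the single-index form B checks
def pvOpt (s : List Int) (v : Int) : Prop :=
  ∃ i : Nat, i + 2 < s.length ∧ s.getD i 0 = v
    ∧ s.getD i 0 + s.getD (i + 1) 0 ≤ s.getD (s.length - 1) 0

lemma pvPA_iff (a : List Int) (v : Int) :
    (∃ c ∈ pyCombs3 a, pvBadMin c = some v)
      ↔ pvOpt (PySem.List.sorted a (fun x => x) false) v := by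
  set s := PySem.List.sorted a (fun x => x) false with hs_def
  have hsa : s.Perm a := PySem.List.sorted_perm a (fun x => x) false
  have hsp : s.Pairwise (· ≤ ·) := PySem.List.sorted_pairwise a (fun x => x)
  constructor
  · rintro ⟨c, hc, hb⟩
    obtain ⟨hcsub, hclen⟩ := (pvMem_pyCombs3 c a).mp hc
    unfold pvBadMin at hb
    rcases hsc : PySem.List.sorted c (fun x => x) false with _ | ⟨x, _ | ⟨y, _ | ⟨z, _ | ⟨w, t⟩⟩⟩⟩ <;>
      rw [hsc] at hb
    · simp at hb
    · simp at hb
    · simp at hb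
    · change (if x + y ≤ z then some x else none) = some v at hb
      have hxyz : x + y ≤ z ∧ x = v := by
        by_cases hle : x + y ≤ z
        · rw [if_pos hle] at hb; exact ⟨hle, Option.some.inj hb⟩
        · rw [if_neg hle] at hb; exact absurd hb (by simp)
      have hperm : [x, y, z].Perm c := by rw [← hsc]; exact PySem.List.sorted_perm c (fun x => x) false
      have hpw : List.Pairwise (· ≤ ·) [x, y, z] := by
        rw [← hsc]; exact PySem.List.sorted_pairwise c (fun x => x)
      have hsubp : [x, y, z].Subperm s :=
        List.Subperm.trans ⟨c, hperm.symm, hcsub⟩ hsa.symm.subperm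
      obtain ⟨i, j, k, hij, hjk, hk, hgi, hgj, hgk⟩ :=
        pvSublist3 x y z s (pvSubSorted s [x, y, z] hsubp hpw hsp)
      refine ⟨i, by omega, by rw [hgi]; exact hxyz.2, ?_⟩
      have h1 : s.getD (i + 1) 0 ≤ s.getD j 0 := pvSortedMono s hsp (by omega) (by omega)
      have h2 : s.getD k 0 ≤ s.getD (s.length - 1) 0 := pvSortedMono s hsp (by omega) (by omega)
      have h3 := hxyz.1
      rw [← hgi, ← hgj, ← hgk] at h3
      omega
    · simp at hb
  · rintro ⟨i, hi2, hv, hle⟩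
    have hsub : [s.getD i 0, s.getD (i + 1) 0, s.getD (s.length - 1) 0].Sublist s :=
      pvSublist_of_idx s i (i + 1) (s.length - 1) (by omega) (by omega) (by omega)
    have hpw : List.Pairwise (· ≤ ·) [s.getD i 0, s.getD (i + 1) 0, s.getD (s.length - 1) 0] := by
      refine List.Pairwise.cons ?_ (List.Pairwise.cons ?_ (List.Pairwise.cons ?_ List.Pairwise.nil))
      · intro b hb
        rcases List.mem_cons.mp hb with rfl | hb
        · exact pvSortedMono s hsp (by omega) (by omega)
        · rcases List.mem_cons.mp hb with rfl | hb
          · exact pvSortedMono s hsp (by omega) (by omega)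
          · simp at hb
      · intro b hb
        rcases List.mem_cons.mp hb with rfl | hb
        · exact pvSortedMono s hsp (by omega) (by omega)
        · simp at hb
      · intro b hb; simp at hb
    have hsp3 : [s.getD i 0, s.getD (i + 1) 0, s.getD (s.length - 1) 0].Subperm a :=
      List.Subperm.trans hsub.subperm hsa.subperm
    obtain ⟨c, hcp, hca⟩ := hsp3
    refine ⟨c, (pvMem_pyCombs3 c a).mpr ⟨hca, by simpa using hcp.length_eq⟩, ?_⟩
    unfold pvBadMin
    rw [PySem.List.sorted_id_eq_of_perm_of_pairwise c _ hcp.symm hpw]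
    show (if s.getD i 0 + s.getD (i + 1) 0 ≤ s.getD (s.length - 1) 0
      then some (s.getD i 0) else none) = some v
    rw [if_pos hle, hv]

lemma pvGetD_nat (s : List Int) (i : Nat) (_h : i < s.length) :
    PySem.List.pyGetD s (i : Int) 0 = s.getD i 0 := by
  simp

lemma pvOpt_iff_range (s : List Int) (v : Int) :
    pvOpt s v ↔ ∃ i ∈ PySem.List.pyRange 0 ((s.length : Int) - 2) 1,
      PySem.List.pyGetD s i 0 + PySem.List.pyGetD s (i + 1) 0
          ≤ PySem.List.pyGetD s ((s.length : Int) - 1) 0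
        ∧ PySem.List.pyGetD s i 0 = v := by
  constructor
  · rintro ⟨i, hi2, hv, hle⟩
    have e1 := pvGetD_nat s i (by omega)
    have e2 := pvGetD_nat s (i + 1) (by omega)
    have e3 := pvGetD_nat s (s.length - 1) (by omega)
    have c2 : ((i : Int) + 1) = ((i + 1 : Nat) : Int) := by push_cast; ring
    have c3 : ((s.length : Int) - 1) = ((s.length - 1 : Nat) : Int) := by omega
    refine ⟨(i : Int), PySem.List.mem_pyRange_one.mpr ⟨by omega, by omega⟩, ?_, ?_⟩
    · rw [c2, c3, e1, e2, e3]; exact hle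
    · rw [e1]; exact hv
  · rintro ⟨i, hmem, hle, hv⟩
    obtain ⟨h0, h2⟩ := PySem.List.mem_pyRange_one.mp hmem
    have e1 := pvGetD_nat s i.toNat (by omega)
    have e2 := pvGetD_nat s (i.toNat + 1) (by omega)
    have e3 := pvGetD_nat s (s.length - 1) (by omega)
    have c1 : ((i.toNat : Nat) : Int) = i := by omega
    have c2 : ((i.toNat + 1 : Nat) : Int) = i + 1 := by omega
    have c3 : ((s.length - 1 : Nat) : Int) = (s.length : Int) - 1 := by omega
    rw [c1] at e1; rw [c2] at e2; rw [c3] at e3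
    refine ⟨i.toNat, by omega, ?_, ?_⟩
    · rw [← e1]; exact hv
    · rw [← e1, ← e2, ← e3]; exact hle

lemma pvBool (P : List (List Int)) (R : List Int) (v : Int)
    (h : (∃ c ∈ P, pvBadMin c = some v) ↔ v ∈ R) :
    P.all (fun c => !(pvBadMin c == some v)) = !PySem.Set.contains R v := by
  by_cases hm : v ∈ R
  · rw [(PySem.Set.contains_iff R v).mpr hm, Bool.not_true]
    obtain ⟨c, hcP, hb⟩ := h.mpr hm
    rw [Bool.eq_false_iff]
    intro hall
    rw [List.all_eq_true] at hall
    have := hall c hcP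
    simp [hb] at this
  · have hc : PySem.Set.contains R v = false :=
      Bool.eq_false_iff.mpr (fun hh => hm ((PySem.Set.contains_iff R v).mp hh))
    rw [hc, Bool.not_false]
    rw [List.all_eq_true]
    intro c hcP
    have hne : pvBadMin c ≠ some v := fun hb => hm (h.mp ⟨c, hcP, hb⟩)
    simp [hne]

lemma pvMain (a : List Int) : sub_tri_seq a = sub_tri_seq_alt a := by
  rw [pvA_eq]
  simp only [sub_tri_seq_alt, PySem.Set.diff]
  refine List.filter_congr (fun v _ => ?_)
  refine pvBool _ _ v ?_
  rw [pvPA_iff a v, pvOpt_iff_range, pvMemRemoved]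
  simp [PySem.Set.empty]

-- ===== VERDICT (by name: the statement is the Claim_ definition above) =====
theorem sub_tri_seq_spec : Claim_equal_sub_tri_seq := by
  intro a _
  unfold Spec_sub_tri_seq
  exact pvMain a
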